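-- pv_equiv track=rewrite | github.com/SpaceshipLord/codewars | John_and_Ann_sign_up_for_Codewars.py | john
-- ===== SOURCE A (Python) =====
-- def john(n):
--
--     a_res = [0]*n
--     j_res = [0]*n
--     a_res[0] = 1
--     j_res[0] = 0
--
--     for i in range(1,n):
--         t = j_res[i-1]
--         j_res[i] = i - a_res[t]
--         t = a_res[i-1]
--         a_res[i] = i-j_res[t]
--
--     return(j_res)
-- ===== SOURCE B (Python) =====
-- def john(n):
--     memo_m = {0: 0}
--     memo_f = {0: 1}
--
--     def m(i):
--         if i not in memo_m:
--             memo_m[i] = i - f(m(i - 1))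
--         return memo_m[i]
--
--     def f(i):
--         if i not in memo_f:
--             memo_f[i] = i - m(f(i - 1))
--         return memo_f[i]
--
--     res = [0] * n
--     for i in range(n):
--         res[i] = m(i)
--     return res
-- ===== Notes on version B (the rewrite author's own statement) =====
-- stated objective: alternative
-- what changed: Replaced A's forward-filled pair of arrays with two mutually recursive memoized helpers m(i)=i-f(m(i-1)), f(i)=i-m(f(i-1)) (Hofstadter male/female); the result list is presized and filled with m(i) for i in range(n).
import Mathlib
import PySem

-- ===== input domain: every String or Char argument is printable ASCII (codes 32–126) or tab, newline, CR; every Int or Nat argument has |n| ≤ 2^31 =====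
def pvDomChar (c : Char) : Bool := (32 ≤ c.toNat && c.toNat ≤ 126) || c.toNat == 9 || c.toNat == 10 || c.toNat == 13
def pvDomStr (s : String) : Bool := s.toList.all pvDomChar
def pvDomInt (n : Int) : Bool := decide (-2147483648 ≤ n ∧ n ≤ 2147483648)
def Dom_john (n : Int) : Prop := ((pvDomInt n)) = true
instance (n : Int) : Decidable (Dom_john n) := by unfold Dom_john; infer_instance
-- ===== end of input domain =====

-- B replaces A's forward-filled pair of arrays by two mutually recursive memoized
-- Hofstadter helpers m/f; same cost, different decomposition (no speed claim).

-- ===== PORT A =====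
-- a_res/j_res are the two arrays; the loop state is the pair (j_res, a_res).
def john (n : Int) : List Int :=
  let a0 : List Int := List.replicate n.toNat 0      -- [0]*n
  let j0 : List Int := List.replicate n.toNat 0      -- [0]*n
  let a1 := PySem.List.pySetD a0 0 1                 -- a_res[0] = 1
  let j1 := PySem.List.pySetD j0 0 0                 -- j_res[0] = 0
  let st := (PySem.List.pyRange 1 n 1).foldl
    (fun (st : List Int × List Int) i =>
      let t := PySem.List.pyGetD st.1 (i - 1) 0                        -- t = j_res[i-1]
      let j' := PySem.List.pySetD st.1 i (i - PySem.List.pyGetD st.2 t 0)  -- j_res[i] = i - a_res[t]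
      let t2 := PySem.List.pyGetD st.2 (i - 1) 0                       -- t = a_res[i-1]
      let a' := PySem.List.pySetD st.2 i (i - PySem.List.pyGetD j' t2 0)   -- a_res[i] = i - j_res[t]
      (j', a'))
    (j1, a1)
  st.1

-- ===== PORT B =====
-- Source B's two mutually recursive memoized helpers m/f: the two memo dictionaries are
-- threaded through the recursion (Python mutates them in place); the extra fuel
-- argument is only a termination guard — with the fuel john_alt passes, the
-- guard branch is never reached (proved below).
mutual
-- def m(i): if i not in memo_m: memo_m[i] = i - f(m(i - 1)); return memo_m[i]
def mRec : Nat → PySem.Dict Int Int → PySem.Dict Int Int → Int →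
    Int × PySem.Dict Int Int × PySem.Dict Int Int
  | fuel, mm, fm, i =>
    match PySem.Dict.get? mm i with
    | some v => (v, mm, fm)
    | none =>
      match fuel with
      | 0 => (0, mm, fm)
      | fuel + 1 =>
        let r1 := mRec fuel mm fm (i - 1)
        let r2 := fRec fuel r1.2.1 r1.2.2 r1.1
        (i - r2.1, PySem.Dict.insert r2.2.1 i (i - r2.1), r2.2.2)
-- def f(i): if i not in memo_f: memo_f[i] = i - m(f(i - 1)); return memo_f[i]
def fRec : Nat → PySem.Dict Int Int → PySem.Dict Int Int → Int →
    Int × PySem.Dict Int Int × PySem.Dict Int Int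
  | fuel, mm, fm, i =>
    match PySem.Dict.get? fm i with
    | some v => (v, mm, fm)
    | none =>
      match fuel with
      | 0 => (1, mm, fm)
      | fuel + 1 =>
        let r1 := fRec fuel mm fm (i - 1)
        let r2 := mRec fuel r1.2.1 r1.2.2 r1.1
        (i - r2.1, r2.2.1, PySem.Dict.insert r2.2.2 i (i - r2.1))
end

-- res = [0]*n; for i in range(n): res[i] = m(i); return res   (memo_m = {0: 0}, memo_f = {0: 1})
def john_alt (n : Int) : List Int :=
  ((PySem.List.pyRange 0 n 1).foldl
    (fun (st : List Int × PySem.Dict Int Int × PySem.Dict Int Int) i =>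
      let r := mRec i.toNat st.2.1 st.2.2 i
      (PySem.List.pySetD st.1 i r.1, r.2))
    (List.replicate n.toNat 0, PySem.Dict.insert PySem.Dict.empty 0 0,
     PySem.Dict.insert PySem.Dict.empty 0 1)).1

-- ===== PRECONDITION & SPEC =====
-- Pre_ excludes exactly n ≤ 0, where A raises IndexError on a_res[0] = 1 (B returns [] there).
def Pre_john (n : Int) : Prop := 1 ≤ n
instance (n : Int) : Decidable (Pre_john n) := by unfold Pre_john; infer_instance
def pvWitness_john : Int := 5

def Spec_john (n : Int) (out : List Int) : Prop := out = john_alt n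
instance (n : Int) (out : List Int) : Decidable (Spec_john n out) := by unfold Spec_john; infer_instance

-- ===== CLAIM (what is proved, stated in full; the proofs are below) =====
def Claim_equal_john : Prop := ∀ (n : Int), Dom_john n → Pre_john n → Spec_john n (john n)

-- ===== LEMMAS AND PROOFS =====

-- Proof-side reference values: the same recursion without the memo tables.
mutual
def mH : Nat → Nat → Nat
  | _, 0 => 0
  | 0, _ + 1 => 0
  | f + 1, i + 1 => (i + 1) - fH f (mH f i)
def fH : Nat → Nat → Nat
  | _, 0 => 1
  | 0, _ + 1 => 1
  | f + 1, i + 1 => (i + 1) - mH f (fH f i)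
end

-- A's loop body, named for the proofs (definitionally the lambda in `john`).
def stepA (st : List Int × List Int) (i : Int) : List Int × List Int :=
  let t := PySem.List.pyGetD st.1 (i - 1) 0
  let j' := PySem.List.pySetD st.1 i (i - PySem.List.pyGetD st.2 t 0)
  let t2 := PySem.List.pyGetD st.2 (i - 1) 0
  let a' := PySem.List.pySetD st.2 i (i - PySem.List.pyGetD j' t2 0)
  (j', a')

lemma john_eq_foldl (n : Int) :
    john n = ((PySem.List.pyRange 1 n 1).foldl stepA
      (PySem.List.pySetD (List.replicate n.toNat (0:Int)) 0 0,
       PySem.List.pySetD (List.replicate n.toNat (0:Int)) 0 1)).1 := rfl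

lemma mH_zero_right (f : Nat) : mH f 0 = 0 := by cases f <;> simp [mH]

lemma fH_zero_right (f : Nat) : fH f 0 = 1 := by cases f <;> simp [fH]

lemma mH_le (f i : Nat) : mH f i ≤ i := by
  match f, i with
  | f, 0 => simp [mH_zero_right]
  | 0, i + 1 => simp [mH]
  | f + 1, i + 1 => rw [mH]; omega

lemma fH_le_succ (f i : Nat) : fH f i ≤ i + 1 := by
  match f, i with
  | f, 0 => simp [fH_zero_right]
  | 0, i + 1 => simp [fH]
  | f + 1, i + 1 => rw [fH]; omega

lemma fH_le (f : Nat) (i : Nat) : fH f (i + 1) ≤ i + 1 := by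
  match f with
  | 0 => simp [fH]
  | f + 1 => rw [fH]; omega

lemma mH_one (f : Nat) : mH f 1 = 0 := by
  cases f with
  | zero => simp [mH]
  | succ g => rw [show (1:Nat) = 0 + 1 from rfl, mH, mH_zero_right, fH_zero_right]

-- Fuel irrelevance: any fuel ≥ i computes the same value as fuel = i.
lemma hof_stab : ∀ i f : Nat, i ≤ f → mH f i = mH i i ∧ fH f i = fH i i := by
  intro i
  induction i using Nat.strong_induction_on with
  | _ i IH =>
    match i with
    | 0 => intro f _; simp [mH_zero_right, fH_zero_right]
    | i + 1 =>
      intro f hf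
      match f with
      | g + 1 =>
        have hg : i ≤ g := by omega
        have keyM : ∀ g', i ≤ g' → mH (g' + 1) (i + 1) = (i + 1) - fH (mH i i) (mH i i) := by
          intro g' hg'
          have h1 := (IH i (by omega) g' hg').1
          have h2 := (IH (mH i i) (by have := mH_le i i; omega) g'
            (le_trans (mH_le i i) hg')).2
          rw [mH, h1, h2]
        have hM : mH (g + 1) (i + 1) = mH (i + 1) (i + 1) := by
          rw [keyM g hg, keyM i (le_refl i)]
        refine ⟨hM, ?_⟩
        match i, hg with
        | 0, _ =>
          simp [fH, fH_zero_right, mH_one]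
        | i + 1, hg =>
          have keyF : ∀ g', i + 1 ≤ g' → fH (g' + 1) (i + 1 + 1) =
              (i + 1 + 1) - mH (fH (i + 1) (i + 1)) (fH (i + 1) (i + 1)) := by
            intro g' hg'
            have h1 := (IH (i + 1) (by omega) g' hg').2
            have hFle : fH (i + 1) (i + 1) ≤ i + 1 := fH_le (i + 1) i
            have h2 := (IH (fH (i + 1) (i + 1)) (by omega) g'
              (le_trans hFle hg')).1
            rw [fH, h1, h2]
          rw [keyF g hg, keyF (i + 1) (le_refl _)]

-- The male/female values and their recurrences.
def Mv (i : Nat) : Nat := mH i i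
def Fv (i : Nat) : Nat := fH i i

lemma Mv_le (k : Nat) : Mv k ≤ k := mH_le k k
lemma Fv_le_succ (k : Nat) : Fv k ≤ k + 1 := fH_le_succ k k

lemma Mv_succ (k : Nat) : Mv (k + 1) = (k + 1) - Fv (Mv k) := by
  have h2 := (hof_stab (mH k k) k (mH_le k k)).2
  show mH (k + 1) (k + 1) = (k + 1) - fH (mH k k) (mH k k)
  rw [mH, h2]

lemma Fv_succ (k : Nat) : Fv (k + 1) = (k + 1) - Mv (Fv k) := by
  match k with
  | 0 => decide
  | k + 1 =>
    have hFle : fH (k + 1) (k + 1) ≤ k + 1 := fH_le (k + 1) k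
    have h2 := (hof_stab (fH (k + 1) (k + 1)) (k + 1) hFle).1
    show fH (k + 1 + 1) (k + 1 + 1) = (k + 1 + 1) - mH (fH (k + 1) (k + 1)) (fH (k + 1) (k + 1))
    rw [fH, h2]

-- Prefixes of A's arrays after the loop has processed i = 1 .. k.
def Jst (N k : Nat) : List Int := (List.range N).map (fun t => if t ≤ k then (Mv t : Int) else 0)
def Ast (N k : Nat) : List Int := (List.range N).map (fun t => if t ≤ k then (Fv t : Int) else 0)

lemma getLst (N k j : Nat) (g : Nat → Int) (hj : j < N) (hjk : j ≤ k) :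
    ((List.range N).map (fun t => if t ≤ k then g t else 0)).getD j 0 = g j := by
  rw [List.getD_eq_getElem _ _ (by simpa using hj)]
  simp [hjk]

lemma setLst (N k : Nat) (g : Nat → Int) (_hk : k + 1 < N) :
    ((List.range N).map (fun t => if t ≤ k then g t else 0)).set (k + 1) (g (k + 1)) =
      (List.range N).map (fun t => if t ≤ k + 1 then g t else 0) := by
  apply List.ext_getElem (by simp)
  intro t h1 h2
  have ht : t < N := by simpa using h2
  rw [List.getElem_set]
  by_cases he : k + 1 = t
  · simp [he.symm]
  · have : t ≤ k ↔ t ≤ k + 1 := by omega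
    simp [List.getElem_map, List.getElem_range, he, this]

lemma stepA_inv (N k : Nat) (hk : k + 1 < N) :
    stepA (Jst N k, Ast N k) ((k : Int) + 1) = (Jst N (k + 1), Ast N (k + 1)) := by
  have hMk : Mv k ≤ k := Mv_le k
  have hFk : Fv k ≤ k + 1 := Fv_le_succ k
  have hFMk : Fv (Mv k) ≤ k + 1 := le_trans (Fv_le_succ _) (by omega)
  have hMFk : Mv (Fv k) ≤ k + 1 := le_trans (Mv_le _) hFk
  unfold stepA
  have e1 : (k : Int) + 1 - 1 = ((k : Nat) : Int) := by omega
  have egJ : PySem.List.pyGetD (Jst N k) ((k : Nat) : Int) 0 = ((Mv k : Nat) : Int) := by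
    rw [PySem.List.pyGetD_natCast]
    exact getLst N k k _ (by omega) (le_refl k)
  have egA : PySem.List.pyGetD (Ast N k) ((Mv k : Nat) : Int) 0 = ((Fv (Mv k) : Nat) : Int) := by
    rw [PySem.List.pyGetD_natCast]
    exact getLst N k (Mv k) _ (by omega) hMk
  have egA2 : PySem.List.pyGetD (Ast N k) ((k : Nat) : Int) 0 = ((Fv k : Nat) : Int) := by
    rw [PySem.List.pyGetD_natCast]
    exact getLst N k k _ (by omega) (le_refl k)
  have ev1 : (k : Int) + 1 - ((Fv (Mv k) : Nat) : Int) = ((Mv (k + 1) : Nat) : Int) := by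
    have := Mv_succ k; omega
  have ecast : (k : Int) + 1 = (((k + 1 : Nat)) : Int) := by push_cast; ring
  have esetJ : PySem.List.pySetD (Jst N k) ((k : Int) + 1) ((Mv (k + 1) : Nat) : Int)
      = Jst N (k + 1) := by
    rw [ecast, PySem.List.pySetD_natCast]
    exact setLst N k _ hk
  have egJ2 : PySem.List.pyGetD (Jst N (k + 1)) ((Fv k : Nat) : Int) 0
      = ((Mv (Fv k) : Nat) : Int) := by
    rw [PySem.List.pyGetD_natCast]
    exact getLst N (k + 1) (Fv k) _ (by omega) hFk
  have ev2 : (k : Int) + 1 - ((Mv (Fv k) : Nat) : Int) = ((Fv (k + 1) : Nat) : Int) := by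
    have := Fv_succ k; omega
  have esetA : PySem.List.pySetD (Ast N k) ((k : Int) + 1) ((Fv (k + 1) : Nat) : Int)
      = Ast N (k + 1) := by
    rw [ecast, PySem.List.pySetD_natCast]
    exact setLst N k _ hk
  simp only [e1, egJ, egA, ev1, esetJ, egA2, egJ2, ev2, esetA]

lemma setRepl (N : Nat) (v : Int) (g : Nat → Int) (hg0 : g 0 = v) :
    (List.replicate N (0:Int)).set 0 v
      = (List.range N).map (fun t => if t ≤ 0 then g t else 0) := by
  apply List.ext_getElem (by simp)
  intro t h1 h2
  rw [List.getElem_set]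
  rcases Nat.eq_zero_or_pos t with ht | ht
  · subst ht; simp [hg0]
  · have h3 : ¬ ((0:Nat) = t) := by omega
    have h4 : ¬ (t = 0) := by omega
    simp [h3, h4, List.getElem_replicate]

lemma init_inv (N : Nat) :
    (PySem.List.pySetD (List.replicate N (0:Int)) 0 0,
     PySem.List.pySetD (List.replicate N (0:Int)) 0 1) = (Jst N 0, Ast N 0) := by
  have h0 : ∀ v : Int, PySem.List.pySetD (List.replicate N (0:Int)) 0 v
      = (List.replicate N (0:Int)).set 0 v := fun v => by
    rw [show (0:Int) = ((0:Nat):Int) from rfl, PySem.List.pySetD_natCast]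
  refine Prod.ext ?_ ?_ <;> simp only [h0]
  · exact setRepl N 0 _ (by show ((Mv 0 : Nat) : Int) = 0; simp [Mv, mH_zero_right])
  · exact setRepl N 1 _ (by show ((Fv 0 : Nat) : Int) = 1; simp [Fv, fH_zero_right])

lemma loop_inv (N : Nat) : ∀ k : Nat, k < N →
    (PySem.List.pyRange 1 ((k : Int) + 1) 1).foldl stepA
      (PySem.List.pySetD (List.replicate N (0:Int)) 0 0,
       PySem.List.pySetD (List.replicate N (0:Int)) 0 1) = (Jst N k, Ast N k) := by
  intro k
  induction k with
  | zero =>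
    intro _
    rw [show ((0 : Nat) : Int) + 1 = 1 by norm_num,
      PySem.List.pyRange_one_eq_nil (le_refl 1)]
    simpa using init_inv N
  | succ k ih =>
    intro hk
    have hk' : k < N := by omega
    rw [show ((k + 1 : Nat) : Int) + 1 = (((k : Nat) : Int) + 1) + 1 by push_cast; ring,
      PySem.List.pyRange_one_succ_right (by omega), List.foldl_append, ih hk']
    simpa using stepA_inv N k hk

-- The memo-table invariants of Source B's dictionaries: every stored entry is a true
-- value of the male (resp. female) sequence, and index 0 is seeded.
def InvM (mm : PySem.Dict Int Int) : Prop :=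
  PySem.Dict.get? mm 0 = some 0 ∧
  ∀ k v, PySem.Dict.get? mm k = some v → ∃ j : Nat, k = (j : Int) ∧ v = ((Mv j : Nat) : Int)

def InvF (fm : PySem.Dict Int Int) : Prop :=
  PySem.Dict.get? fm 0 = some 1 ∧
  ∀ k v, PySem.Dict.get? fm k = some v → ∃ j : Nat, k = (j : Int) ∧ v = ((Fv j : Nat) : Int)

lemma InvM_insert (mm : PySem.Dict Int Int) (hm : InvM mm) (j : Nat) (k v : Int)
    (hk : k = ((j + 1 : Nat) : Int)) (hv : v = ((Mv (j + 1) : Nat) : Int)) :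
    InvM (PySem.Dict.insert mm k v) := by
  subst hk hv
  constructor
  · rw [PySem.Dict.get?_insert_of_ne _ _ (by push_cast; omega)]
    exact hm.1
  · intro k' v' hk'
    rw [PySem.Dict.get?_insert] at hk'
    by_cases hkj : k' = ((j + 1 : Nat) : Int)
    · rw [if_pos hkj] at hk'
      exact ⟨j + 1, hkj, (Option.some.inj hk').symm⟩
    · rw [if_neg hkj] at hk'
      exact hm.2 k' v' hk'

lemma InvF_insert (fm : PySem.Dict Int Int) (hf : InvF fm) (j : Nat) (k v : Int)
    (hk : k = ((j + 1 : Nat) : Int)) (hv : v = ((Fv (j + 1) : Nat) : Int)) :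
    InvF (PySem.Dict.insert fm k v) := by
  subst hk hv
  constructor
  · rw [PySem.Dict.get?_insert_of_ne _ _ (by push_cast; omega)]
    exact hf.1
  · intro k' v' hk'
    rw [PySem.Dict.get?_insert] at hk'
    by_cases hkj : k' = ((j + 1 : Nat) : Int)
    · rw [if_pos hkj] at hk'
      exact ⟨j + 1, hkj, (Option.some.inj hk').symm⟩
    · rw [if_neg hkj] at hk'
      exact hf.2 k' v' hk'

lemma Mv_one : Mv 1 = 0 := mH_one 1

-- One-step branch laws of mRec/fRec (memo hit, fuel-0 guard, recursive step).
lemma mRec_hit (fuel : Nat) (mm fm : PySem.Dict Int Int) (i v : Int)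
    (h : PySem.Dict.get? mm i = some v) : mRec fuel mm fm i = (v, mm, fm) := by
  rw [mRec.eq_def]; dsimp only; rw [h]

lemma fRec_hit (fuel : Nat) (mm fm : PySem.Dict Int Int) (i v : Int)
    (h : PySem.Dict.get? fm i = some v) : fRec fuel mm fm i = (v, mm, fm) := by
  rw [fRec.eq_def]; dsimp only; rw [h]

lemma mRec_miss_zero (mm fm : PySem.Dict Int Int) (i : Int)
    (h : PySem.Dict.get? mm i = none) : mRec 0 mm fm i = (0, mm, fm) := by
  rw [mRec.eq_def]; dsimp only; rw [h]

lemma mRec_miss_succ (f : Nat) (mm fm : PySem.Dict Int Int) (i : Int)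
    (h : PySem.Dict.get? mm i = none)
    (a b : Int) (mm1 fm1 mm2 fm2 : PySem.Dict Int Int)
    (h1 : mRec f mm fm (i - 1) = (a, mm1, fm1))
    (h2 : fRec f mm1 fm1 a = (b, mm2, fm2)) :
    mRec (f + 1) mm fm i = (i - b, PySem.Dict.insert mm2 i (i - b), fm2) := by
  rw [mRec.eq_def]; dsimp only; rw [h]; simp [h1, h2]

lemma fRec_miss_succ (f : Nat) (mm fm : PySem.Dict Int Int) (i : Int)
    (h : PySem.Dict.get? fm i = none)
    (a b : Int) (mm1 fm1 mm2 fm2 : PySem.Dict Int Int)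
    (h1 : fRec f mm fm (i - 1) = (a, mm1, fm1))
    (h2 : mRec f mm1 fm1 a = (b, mm2, fm2)) :
    fRec (f + 1) mm fm i = (i - b, mm2, PySem.Dict.insert fm2 i (i - b)) := by
  rw [fRec.eq_def]; dsimp only; rw [h]; simp [h1, h2]

-- m(1) is computed correctly with ANY fuel: on a memo miss the recursion only
-- touches the seeded entries m(0) and f(0).
lemma mRec_one (fuel : Nat) (mm fm : PySem.Dict Int Int) (hm : InvM mm) (hf : InvF fm) :
    ∃ mm' fm', mRec fuel mm fm 1 = (((Mv 1 : Nat) : Int), mm', fm') ∧ InvM mm' ∧ InvF fm' := by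
  cases hhit : PySem.Dict.get? mm 1 with
  | some v =>
    obtain ⟨j, hj, hv⟩ := hm.2 1 v hhit
    have hj1 : j = 1 := by omega
    subst hj1
    exact ⟨mm, fm, by rw [mRec_hit fuel mm fm 1 v hhit, hv], hm, hf⟩
  | none =>
    cases fuel with
    | zero =>
      exact ⟨mm, fm, by rw [mRec_miss_zero mm fm 1 hhit]; simp [Mv_one], hm, hf⟩
    | succ f =>
      have h1 : mRec f mm fm (1 - 1) = ((0 : Int), mm, fm) := by
        rw [show (1 : Int) - 1 = 0 by norm_num]
        exact mRec_hit f mm fm 0 0 hm.1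
      have h2 : fRec f mm fm 0 = ((1 : Int), mm, fm) := fRec_hit f mm fm 0 1 hf.1
      rw [mRec_miss_succ f mm fm 1 hhit 0 1 mm fm mm fm h1 h2]
      refine ⟨PySem.Dict.insert mm 1 (1 - 1), fm, ?_, ?_, hf⟩
      · simp [Mv_one]
      · exact InvM_insert mm hm 0 _ _ (by norm_num) (by simp [Mv_one])

-- Adequate fuel: with fuel ≥ i and valid memo tables, mRec/fRec return the true
-- male/female values and preserve the invariants.
lemma rec_ok : ∀ i : Nat,
    (∀ fuel : Nat, i ≤ fuel → ∀ mm fm, InvM mm → InvF fm →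
      ∃ mm' fm', mRec fuel mm fm (i : Int) = (((Mv i : Nat) : Int), mm', fm') ∧ InvM mm' ∧ InvF fm') ∧
    (∀ fuel : Nat, i ≤ fuel → ∀ mm fm, InvM mm → InvF fm →
      ∃ mm' fm', fRec fuel mm fm (i : Int) = (((Fv i : Nat) : Int), mm', fm') ∧ InvM mm' ∧ InvF fm') := by
  intro i
  induction i using Nat.strong_induction_on with
  | _ i IH =>
    constructor
    · -- mRec
      intro fuel hfuel mm fm hm hf
      cases hhit : PySem.Dict.get? mm (i : Int) with
      | some v =>
        obtain ⟨j, hj, hv⟩ := hm.2 _ v hhit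
        have hji : j = i := by omega
        subst hji
        exact ⟨mm, fm, by rw [mRec_hit fuel mm fm _ v hhit, hv], hm, hf⟩
      | none =>
        cases i with
        | zero => rw [Nat.cast_zero, hm.1] at hhit; cases hhit
        | succ j =>
          cases fuel with
          | zero => omega
          | succ f =>
            have hfj : j ≤ f := by omega
            have hcast : ((j + 1 : Nat) : Int) - 1 = ((j : Nat) : Int) := by push_cast; ring
            obtain ⟨mm1, fm1, hr1, hm1, hf1⟩ := (IH j (by omega)).1 f hfj mm fm hm hf
            obtain ⟨mm2, fm2, hr2, hm2, hf2⟩ :=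
              (IH (Mv j) (by have := Mv_le j; omega)).2 f (le_trans (Mv_le j) hfj) mm1 fm1 hm1 hf1
            have hr1' : mRec f mm fm (((j + 1 : Nat) : Int) - 1)
                = (((Mv j : Nat) : Int), mm1, fm1) := by rw [hcast]; exact hr1
            rw [mRec_miss_succ f mm fm _ hhit _ _ mm1 fm1 mm2 fm2 hr1' hr2]
            have hval : ((j + 1 : Nat) : Int) - ((Fv (Mv j) : Nat) : Int)
                = ((Mv (j + 1) : Nat) : Int) := by
              have h1 := Mv_succ j
              have h2 : Fv (Mv j) ≤ j + 1 := le_trans (Fv_le_succ _) (by have := Mv_le j; omega)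
              omega
            rw [hval]
            exact ⟨_, _, rfl, InvM_insert mm2 hm2 j _ _ rfl rfl, hf2⟩
    · -- fRec
      intro fuel hfuel mm fm hm hf
      cases hhit : PySem.Dict.get? fm (i : Int) with
      | some v =>
        obtain ⟨j, hj, hv⟩ := hf.2 _ v hhit
        have hji : j = i := by omega
        subst hji
        exact ⟨mm, fm, by rw [fRec_hit fuel mm fm _ v hhit, hv], hm, hf⟩
      | none =>
        cases i with
        | zero => rw [Nat.cast_zero, hf.1] at hhit; cases hhit
        | succ j =>
          cases fuel with
          | zero => omega
          | succ f =>
            have hfj : j ≤ f := by omega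
            have hcast : ((j + 1 : Nat) : Int) - 1 = ((j : Nat) : Int) := by push_cast; ring
            obtain ⟨mm1, fm1, hr1, hm1, hf1⟩ := (IH j (by omega)).2 f hfj mm fm hm hf
            have hrec2 : ∃ mm2 fm2, mRec f mm1 fm1 ((Fv j : Nat) : Int)
                = (((Mv (Fv j) : Nat) : Int), mm2, fm2) ∧ InvM mm2 ∧ InvF fm2 := by
              cases j with
              | zero =>
                obtain ⟨mm2, fm2, h, hm2, hf2⟩ := mRec_one f mm1 fm1 hm1 hf1
                refine ⟨mm2, fm2, ?_, hm2, hf2⟩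
                rw [show Fv 0 = 1 by decide, Nat.cast_one, h]
              | succ k =>
                have hFle : Fv (k + 1) ≤ k + 1 := fH_le (k + 1) k
                exact (IH (Fv (k + 1)) (by omega)).1 f (le_trans hFle hfj) mm1 fm1 hm1 hf1
            obtain ⟨mm2, fm2, hr2, hm2, hf2⟩ := hrec2
            have hr1' : fRec f mm fm (((j + 1 : Nat) : Int) - 1)
                = (((Fv j : Nat) : Int), mm1, fm1) := by rw [hcast]; exact hr1
            rw [fRec_miss_succ f mm fm _ hhit _ _ mm1 fm1 mm2 fm2 hr1' hr2]
            have hval : ((j + 1 : Nat) : Int) - ((Mv (Fv j) : Nat) : Int)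
                = ((Fv (j + 1) : Nat) : Int) := by
              have h1 := Fv_succ j
              have h2 : Mv (Fv j) ≤ j + 1 := le_trans (Mv_le _) (Fv_le_succ j)
              omega
            rw [hval]
            exact ⟨_, _, rfl, hm2, InvF_insert fm2 hf2 j _ _ rfl rfl⟩

-- B's loop body, named for the proofs (definitionally the lambda in `john_alt`).
def stepB (st : List Int × PySem.Dict Int Int × PySem.Dict Int Int) (i : Int) :
    List Int × PySem.Dict Int Int × PySem.Dict Int Int :=
  let r := mRec i.toNat st.2.1 st.2.2 i
  (PySem.List.pySetD st.1 i r.1, r.2)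

lemma john_alt_eq_foldl (n : Int) :
    john_alt n = ((PySem.List.pyRange 0 n 1).foldl stepB
      (List.replicate n.toNat 0, PySem.Dict.insert PySem.Dict.empty 0 0,
           PySem.Dict.insert PySem.Dict.empty 0 1)).1 := rfl

-- B's result array after the loop has written indices 0 .. k-1.
def Wst (N k : Nat) : List Int := (List.range N).map (fun t => if t < k then ((Mv t : Nat) : Int) else 0)

lemma Wst_zero (N : Nat) : Wst N 0 = List.replicate N (0 : Int) := by
  apply List.ext_getElem (by simp [Wst])
  intro t h1 h2
  simp [Wst]

lemma Wst_set (N k : Nat) (_hk : k < N) :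
    PySem.List.pySetD (Wst N k) ((k : Nat) : Int) ((Mv k : Nat) : Int) = Wst N (k + 1) := by
  rw [PySem.List.pySetD_natCast]
  apply List.ext_getElem (by simp [Wst])
  intro t h1 h2
  rw [List.getElem_set]
  by_cases he : k = t
  · simp [Wst, ← he]
  · have : t < k ↔ t < k + 1 := by omega
    simp [Wst, he, this]

lemma InvM_init : InvM (PySem.Dict.insert PySem.Dict.empty 0 0) := by
  constructor
  · rw [PySem.Dict.get?_insert_self]
  · intro k v hk
    rw [PySem.Dict.get?_insert] at hk
    by_cases h : k = 0
    · rw [if_pos h] at hk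
      exact ⟨0, h, (Option.some.inj hk).symm⟩
    · rw [if_neg h, PySem.Dict.get?_empty] at hk; cases hk

lemma InvF_init : InvF (PySem.Dict.insert PySem.Dict.empty 0 1) := by
  constructor
  · rw [PySem.Dict.get?_insert_self]
  · intro k v hk
    rw [PySem.Dict.get?_insert] at hk
    by_cases h : k = 0
    · rw [if_pos h] at hk
      exact ⟨0, h, (Option.some.inj hk).symm⟩
    · rw [if_neg h, PySem.Dict.get?_empty] at hk; cases hk

lemma foldB_inv (N : Nat) : ∀ k : Nat, k ≤ N → ∃ mm fm,
    ((List.range k).map (fun t : Nat => (t : Int))).foldl stepB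
      (List.replicate N (0 : Int), PySem.Dict.insert PySem.Dict.empty 0 0,
           PySem.Dict.insert PySem.Dict.empty 0 1)
      = (Wst N k, mm, fm) ∧ InvM mm ∧ InvF fm := by
  intro k
  induction k with
  | zero =>
    intro _
    exact ⟨_, _, by simp [Wst_zero], InvM_init, InvF_init⟩
  | succ k ih =>
    intro hk
    obtain ⟨mm, fm, heq, hm, hf⟩ := ih (by omega)
    obtain ⟨mm', fm', hrec, hm', hf'⟩ := (rec_ok k).1 k (le_refl k) mm fm hm hf
    refine ⟨mm', fm', ?_, hm', hf'⟩
    rw [List.range_succ, List.map_append, List.foldl_append, heq]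
    simp only [List.map_cons, List.map_nil, List.foldl_cons, List.foldl_nil, stepB,
      Int.toNat_natCast]
    rw [hrec]
    simp only []
    rw [Wst_set N k (by omega)]

-- ===== VERDICT (by name: the statement is the Claim_ definition above) =====
theorem john_spec : Claim_equal_john := by
  intro n _ hpre
  unfold Spec_john Pre_john at *
  obtain ⟨N, rfl⟩ : ∃ N : Nat, n = (N : Int) :=
    ⟨n.toNat, (Int.toNat_of_nonneg (by omega)).symm⟩
  have hN : 1 ≤ N := by exact_mod_cast hpre
  rw [john_eq_foldl]
  have hrange : ((N : Int)) = ((N - 1 : Nat) : Int) + 1 := by push_cast [hN]; ring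
  rw [show ((N : Int)).toNat = N from Int.toNat_natCast N, hrange,
    loop_inv N (N - 1) (by omega), ← hrange]
  have hpr : PySem.List.pyRange 0 (N : Int) 1 = (List.range N).map (fun t : Nat => (t : Int)) := by
    rw [PySem.List.pyRange_one]
    simp
  obtain ⟨mm, fm, heq, -, -⟩ := foldB_inv N N (le_refl N)
  rw [john_alt_eq_foldl, Int.toNat_natCast, hpr, heq]
  show Jst N (N - 1) = Wst N N
  unfold Jst Wst
  apply List.map_congr_left
  intro t ht
  have h1 : t ≤ N - 1 := by have := List.mem_range.mp ht; omega
  have h2 : t < N := List.mem_range.mp ht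
  simp [h1, h2]
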